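-- pv_equiv track=rewrite | github.com/abdelrhman445/nullspecter_chacker_vuln_tool | checks/cors.py | extract_cors_headers
-- ===== SOURCE A (Python) =====
-- from typing import Dict, List, Optional
--
-- def extract_cors_headers(headers: Dict) -> Dict:
--     """Extract CORS-related headers"""
--     cors_headers = {}
--
--     cors_header_names = [
--         'Access-Control-Allow-Origin',
--         'Access-Control-Allow-Credentials',
--         'Access-Control-Allow-Methods',
--         'Access-Control-Allow-Headers',
--         'Access-Control-Expose-Headers',
--         'Access-Control-Max-Age',
--     ]
--
--     for header in cors_header_names:
--         if header in headers:
--             cors_headers[header] = headers[header]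
--
--     return cors_headers
-- ===== SOURCE B (Python) =====
-- def extract_cors_headers(headers):
--     """Extract CORS-related headers"""
--     rank = {name: i for i, name in enumerate((
--         'Access-Control-Allow-Origin',
--         'Access-Control-Allow-Credentials',
--         'Access-Control-Allow-Methods',
--         'Access-Control-Allow-Headers',
--         'Access-Control-Expose-Headers',
--         'Access-Control-Max-Age',
--     ))}
--     return dict(sorted((item for item in headers.items() if item[0] in rank),
--                        key=lambda item: rank[item[0]]))
-- ===== Notes on version B (the rewrite author's own statement) =====
-- stated objective: alternative
-- what changed: B inverts the traversal: instead of probing the dict once per fixed CORS name, it builds a rank dict from the six names, filters the input's own items by membership in it, and sorts the survivors by rank to recover the canonical name order.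
import Mathlib
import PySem

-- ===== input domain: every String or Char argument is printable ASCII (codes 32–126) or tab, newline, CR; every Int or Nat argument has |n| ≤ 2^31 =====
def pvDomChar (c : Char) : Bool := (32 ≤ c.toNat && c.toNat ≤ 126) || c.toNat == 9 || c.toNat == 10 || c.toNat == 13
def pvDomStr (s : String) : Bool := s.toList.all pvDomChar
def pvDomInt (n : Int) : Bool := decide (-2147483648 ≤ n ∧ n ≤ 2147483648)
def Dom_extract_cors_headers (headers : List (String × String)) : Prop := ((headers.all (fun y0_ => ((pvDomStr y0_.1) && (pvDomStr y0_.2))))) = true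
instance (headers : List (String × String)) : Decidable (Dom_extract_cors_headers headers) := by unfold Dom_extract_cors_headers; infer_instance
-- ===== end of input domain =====

-- B filters the input's items by a precomputed rank dict and sorts them into the
-- canonical CORS-header order, instead of probing the dict once per fixed name
-- (objective: alternative decomposition, input-driven instead of name-driven).

-- ===== PORT A =====
-- the literal cors_header_names list of A
def corsHeaderNames : List String :=
  ["Access-Control-Allow-Origin",
   "Access-Control-Allow-Credentials",
   "Access-Control-Allow-Methods",
   "Access-Control-Allow-Headers",
   "Access-Control-Expose-Headers",
   "Access-Control-Max-Age"]

-- 'header in headers' = (List.lookup …).isSome (first-match lookup on the dict's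
-- association list); 'headers[header]' = (List.lookup …).getD "" — the default ""
-- is never read, the access is guarded by the membership test
def extract_cors_headers (headers : List (String × String)) : List (String × String) :=
  (corsHeaderNames.foldl
    (fun d header =>
      if (List.lookup header headers).isSome then
        d.insert header ((List.lookup header headers).getD "")
      else d)
    PySem.Dict.empty).items

-- ===== PORT B =====
-- rank = {name: i for i, name in enumerate((…the six names…))}
def corsRank : PySem.Dict String Int :=
  ((PySem.List.enumerate corsHeaderNames).foldl
    (fun d p => d.insert p.2 p.1) PySem.Dict.empty)

-- dict(sorted((item for item in headers.items() if item[0] in rank), key=lambda item: rank[item[0]]))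
-- ('rank[item[0]]' is total here because the generator keeps only keys of rank;
-- ported as getD with default 0, which is never read)
def extract_cors_headers_alt (headers : List (String × String)) : List (String × String) :=
  (PySem.Dict.ofList
    (PySem.List.sorted (headers.filter (fun item => corsRank.contains item.1))
      (fun item => corsRank.getD item.1 0) false)).items

-- ===== PRECONDITION & SPEC =====
-- Pre_ excludes association lists with duplicate keys: they do not represent a Python
-- dict (A's argument is a dict, so duplicate keys can never reach it), and which
-- occurrence survives is an artefact of the list representation.
def Pre_extract_cors_headers (headers : List (String × String)) : Prop :=
  (headers.map Prod.fst).Nodup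
instance (headers : List (String × String)) : Decidable (Pre_extract_cors_headers headers) := by
  unfold Pre_extract_cors_headers; infer_instance

def pvWitness_extract_cors_headers : (List (String × String)) :=
  [("Access-Control-Allow-Origin", "*"), ("Content-Type", "text/html"),
   ("Access-Control-Max-Age", "600")]

def Spec_extract_cors_headers (headers : List (String × String)) (out : List (String × String)) : Prop := out = extract_cors_headers_alt headers
instance (headers : List (String × String)) (out : List (String × String)) : Decidable (Spec_extract_cors_headers headers out) := by unfold Spec_extract_cors_headers; infer_instance

-- ===== CLAIM (what is proved, stated in full; the proofs are below) =====
def Claim_equal_extract_cors_headers : Prop := ∀ (headers : List (String × String)), Dom_extract_cors_headers headers → Pre_extract_cors_headers headers → Spec_extract_cors_headers headers (extract_cors_headers headers)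

-- ===== LEMMAS AND PROOFS =====

-- membership in the rank dict is membership in the name list
theorem corsRank_contains (k : String) :
    corsRank.contains k = decide (k ∈ corsHeaderNames) := by
  rw [PySem.Dict.contains_eq_decide_mem_keys, show corsRank.keys = corsHeaderNames from rfl]

-- the rank values are strictly increasing along the name list
theorem names_pairwise :
    corsHeaderNames.Pairwise (fun a b => corsRank.getD a 0 < corsRank.getD b 0) := by decide

theorem names_nodup : corsHeaderNames.Nodup := by decide

-- first-match lookup on a duplicate-free association list finds each stored pair
theorem lookup_eq_some_of_mem (l : List (String × String)) (k v : String)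
    (hn : (l.map Prod.fst).Nodup) (hm : (k, v) ∈ l) : List.lookup k l = some v := by
  induction l with
  | nil => cases hm
  | cons p t ih =>
    simp only [List.map_cons, List.nodup_cons] at hn
    rcases List.mem_cons.mp hm with h | h
    · subst h; simp [List.lookup]
    · have hk : (k == p.1) = false := beq_eq_false_iff_ne.mpr
        (fun he => hn.1 (he ▸ (List.mem_map_of_mem (f := Prod.fst) h)))
      simp [List.lookup, hk, ih hn.2 h]

theorem mem_of_lookup_eq_some (l : List (String × String)) (k v : String)
    (h : List.lookup k l = some v) : (k, v) ∈ l := by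
  induction l with
  | nil => simp [List.lookup] at h
  | cons p t ih =>
    by_cases hk : k = p.1
    · subst hk
      simp [List.lookup] at h
      exact List.mem_cons.mpr (Or.inl (by cases p; simp_all))
    · have hb : (k == p.1) = false := beq_eq_false_iff_ne.mpr hk
      simp only [List.lookup, hb] at h
      exact List.mem_cons.mpr (Or.inr (ih h))

-- A's loop over fresh distinct names appends one item per name present in headers
theorem foldA_items (headers : List (String × String)) (ns : List String)
    (d : PySem.Dict String String) (hn : ns.Nodup)
    (hf : ∀ n ∈ ns, d.contains n = false) :
    (ns.foldl
      (fun d header =>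
        if (List.lookup header headers).isSome then
          d.insert header ((List.lookup header headers).getD "")
        else d) d).items
    = d.items ++ (ns.filter (fun n => (List.lookup n headers).isSome)).map
        (fun n => (n, (List.lookup n headers).getD "")) := by
  induction ns generalizing d with
  | nil => simp
  | cons n t ih =>
    simp only [List.nodup_cons] at hn
    by_cases hs : (List.lookup n headers).isSome
    · rw [List.foldl_cons, if_pos hs,
        ih _ hn.2 (fun m hm => by
          rw [PySem.Dict.contains_insert]
          have : (m == n) = false := beq_eq_false_iff_ne.mpr (fun he => hn.1 (he ▸ hm))
          simp [this, hf m (List.mem_cons_of_mem _ hm)]),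
        PySem.Dict.items_insert_of_not_contains _ _ (hf n List.mem_cons_self)]
      simp [hs]
    · rw [List.foldl_cons, if_neg hs, ih _ hn.2 (fun m hm => hf m (List.mem_cons_of_mem _ hm))]
      simp [hs]

-- both programs compute the present names, in name-list order, with their values
theorem ports_agree (headers : List (String × String)) (hpre : (headers.map Prod.fst).Nodup) :
    extract_cors_headers headers = extract_cors_headers_alt headers := by
  set F : List (String × String) :=
    (corsHeaderNames.filter (fun n => (List.lookup n headers).isSome)).map
      (fun n => (n, (List.lookup n headers).getD "")) with hF
  have hA : extract_cors_headers headers = F := by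
    rw [extract_cors_headers,
      foldA_items headers corsHeaderNames PySem.Dict.empty names_nodup
        (fun n _ => PySem.Dict.contains_empty n)]
    simp [hF, PySem.Dict.empty]
  have hFkeys : (F.map Prod.fst).Nodup := by
    rw [hF, List.map_map]
    exact (names_nodup.filter _).map (fun a b h => h)
  have hFnodup : F.Nodup := by
    rw [hF]
    exact (names_nodup.filter _).map (fun a b h => congrArg Prod.fst h)
  have hPnodup : (headers.filter (fun item => corsRank.contains item.1)).Nodup :=
    (List.Nodup.of_map _ hpre).filter _
  have hmem : ∀ p, p ∈ F ↔ p ∈ headers.filter (fun item => corsRank.contains item.1) := by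
    intro p
    constructor
    · intro hp
      rw [hF] at hp
      rcases List.mem_map.mp hp with ⟨n, hn, rfl⟩
      rcases List.mem_filter.mp hn with ⟨hn1, hn2⟩
      rcases Option.isSome_iff_exists.mp hn2 with ⟨v, hv⟩
      rw [List.mem_filter]
      refine ⟨?_, ?_⟩
      · have := mem_of_lookup_eq_some headers n v hv
        rw [hv]; simpa using this
      · simp [corsRank_contains, hn1]
    · intro hp
      rcases List.mem_filter.mp hp with ⟨hp1, hp2⟩
      rw [corsRank_contains] at hp2
      have hmemn : p.1 ∈ corsHeaderNames := by simpa using hp2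
      have hv : List.lookup p.1 headers = some p.2 :=
        lookup_eq_some_of_mem headers p.1 p.2 hpre (by simpa using hp1)
      rw [hF]
      refine List.mem_map.mpr ⟨p.1, List.mem_filter.mpr ⟨hmemn, by simp [hv]⟩, ?_⟩
      simp [hv]
  have hperm : F.Perm (headers.filter (fun item => corsRank.contains item.1)) :=
    List.perm_of_nodup_nodup_toFinset_eq hFnodup hPnodup
      (Finset.ext (fun p => by simp [List.mem_toFinset, hmem p]))
  have hpair : F.Pairwise (fun a b => corsRank.getD a.1 0 < corsRank.getD b.1 0) := by
    rw [hF]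
    exact (List.pairwise_map).mpr ((names_pairwise.filter _).imp (fun h => h))
  have hsorted : PySem.List.sorted (headers.filter (fun item => corsRank.contains item.1))
      (fun item => corsRank.getD item.1 0) = F :=
    PySem.List.sorted_eq_of_perm_of_pairwise_lt _ _ _ hperm hpair
  rw [hA, extract_cors_headers_alt, hsorted, PySem.Dict.ofList, PySem.Dict.update,
    PySem.Dict.items_foldl_insert_fresh F Prod.fst Prod.snd PySem.Dict.empty
      (fun a _ => PySem.Dict.contains_empty a.1) hFkeys]
  simp [PySem.Dict.empty]

-- ===== VERDICT (by name: the statement is the Claim_ definition above) =====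
theorem extract_cors_headers_spec : Claim_equal_extract_cors_headers := by
  intro headers _ hpre
  unfold Spec_extract_cors_headers
  exact ports_agree headers hpre
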